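-- pv_equiv track=rewrite | github.com/toaq/toakao | compare_with_gaqmekao.py | dict_elem_from_any_key
-- ===== SOURCE A (Python) =====
-- def dict_elem_from_any_key(dictionary, possible_keys):
--   r = None
--   is_found = False
--   for k in possible_keys:
--     if k in dictionary:
--       if not is_found:
--         r = dictionary[k]
--         is_found = True
--       else:
--         if r != dictionary[k]:
--           raise Exception(
--             "dict_elem_from_any_key(): more than one element found!")
--   return r
-- ===== SOURCE B (Python) =====
-- def dict_elem_from_any_key(dictionary, possible_keys):
--     # pass 1: collect all matched values
--     vals = [dictionary[k] for k in possible_keys if k in dictionary]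
--     if not vals:
--         return None
--     # pass 2: validate consistency
--     if not all(v == vals[0] for v in vals[1:]):
--         raise Exception(
--             "dict_elem_from_any_key(): more than one element found!")
--     return vals[0]
-- ===== Notes on version B (the rewrite author's own statement) =====
-- stated objective: simpler
-- what changed: Replaces the interleaved stateful scan (r/is_found flags with an in-loop conflict check) by a two-stage collect-then-validate shape: one comprehension gathers all matched values, then a separate pass checks they all agree before returning the first.
import Mathlib
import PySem

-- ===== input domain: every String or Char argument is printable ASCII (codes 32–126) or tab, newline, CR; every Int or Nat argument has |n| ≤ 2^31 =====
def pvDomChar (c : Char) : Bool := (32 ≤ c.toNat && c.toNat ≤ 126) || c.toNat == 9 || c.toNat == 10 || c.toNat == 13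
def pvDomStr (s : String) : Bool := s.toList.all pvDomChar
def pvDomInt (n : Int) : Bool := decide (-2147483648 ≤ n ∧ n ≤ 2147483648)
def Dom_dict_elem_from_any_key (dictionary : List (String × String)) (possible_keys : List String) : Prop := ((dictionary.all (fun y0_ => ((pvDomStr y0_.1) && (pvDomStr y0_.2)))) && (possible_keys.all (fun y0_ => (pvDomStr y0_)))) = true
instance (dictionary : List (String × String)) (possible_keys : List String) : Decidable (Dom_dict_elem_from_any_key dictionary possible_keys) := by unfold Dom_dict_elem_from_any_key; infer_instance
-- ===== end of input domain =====

-- B replaces A's interleaved stateful scan by a two-stage collect-then-validate shape (objective: simpler).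


-- ===== PORT A =====
-- Loop over possible_keys carrying the state (r, is_found); the raise branch (a second,
-- conflicting match) lies outside Pre_ — there the port leaves the state unchanged.
def dict_elem_from_any_key (dictionary : List (String × String)) (possible_keys : List String) : Option String :=
  (possible_keys.foldl
    (fun (st : Option String × Bool) k =>
      match (PySem.Dict.mk dictionary).get? k with
      | none => st
      | some v => if st.2 = false then (some v, true) else st)
    (none, false)).1

-- ===== PORT B =====
-- pass 1: collect all matched values; pass 2: validate (the conflict raise lies outside Pre_)
-- and return the first collected value, or none if nothing matched.
def dict_elem_from_any_key_alt (dictionary : List (String × String)) (possible_keys : List String) : Option String :=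
  let vals := possible_keys.filterMap (fun k => (PySem.Dict.mk dictionary).get? k)
  match vals with
  | [] => none
  | v :: _ => some v

-- ===== PRECONDITION & SPEC =====
-- Pre_ excludes exactly the inputs on which Python A (and B) raise:
-- two matched keys mapping to different values.
def Pre_dict_elem_from_any_key (dictionary : List (String × String)) (possible_keys : List String) : Prop :=
  ∀ v₁ ∈ possible_keys.filterMap (fun k => (PySem.Dict.mk dictionary).get? k),
    ∀ v₂ ∈ possible_keys.filterMap (fun k => (PySem.Dict.mk dictionary).get? k), v₁ = v₂
instance (dictionary : List (String × String)) (possible_keys : List String) : Decidable (Pre_dict_elem_from_any_key dictionary possible_keys) := by unfold Pre_dict_elem_from_any_key; infer_instance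
def pvWitness_dict_elem_from_any_key : (List (String × String)) × List String := ([("a", "x"), ("b", "x")], ["b", "a", "c"])
def Spec_dict_elem_from_any_key (dictionary : List (String × String)) (possible_keys : List String) (out : Option String) : Prop := out = dict_elem_from_any_key_alt dictionary possible_keys
instance (dictionary : List (String × String)) (possible_keys : List String) (out : Option String) : Decidable (Spec_dict_elem_from_any_key dictionary possible_keys out) := by unfold Spec_dict_elem_from_any_key; infer_instance

-- ===== CLAIM (what is proved, stated in full; the proofs are below) =====
def Claim_equal_dict_elem_from_any_key : Prop := ∀ (dictionary : List (String × String)) (possible_keys : List String), Dom_dict_elem_from_any_key dictionary possible_keys → Pre_dict_elem_from_any_key dictionary possible_keys → Spec_dict_elem_from_any_key dictionary possible_keys (dict_elem_from_any_key dictionary possible_keys)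

-- ===== LEMMAS AND PROOFS =====

-- Once A's loop has found a value, the state never changes again.
theorem dict_foldl_found (dictionary : List (String × String)) (ks : List String) (v : String) :
    ks.foldl
      (fun (st : Option String × Bool) k =>
        match (PySem.Dict.mk dictionary).get? k with
        | none => st
        | some w => if st.2 = false then (some w, true) else st)
      (some v, true) = (some v, true) := by
  induction ks with
  | nil => rfl
  | cons k ks ih =>
    simp only [List.foldl_cons]
    cases (PySem.Dict.mk dictionary).get? k <;> simpa using ih

-- ===== VERDICT (by name: the statement is the Claim_ definition above) =====
theorem dict_foldl_eq_filterMap_head (dictionary : List (String × String)) (possible_keys : List String) :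
    dict_elem_from_any_key dictionary possible_keys = dict_elem_from_any_key_alt dictionary possible_keys := by
  unfold dict_elem_from_any_key dict_elem_from_any_key_alt
  induction possible_keys with
  | nil => rfl
  | cons k ks ih =>
    simp only [List.foldl_cons, List.filterMap_cons]
    cases h : (PySem.Dict.mk dictionary).get? k with
    | none => simpa using ih
    | some v => simp [dict_foldl_found]

theorem dict_elem_from_any_key_spec : Claim_equal_dict_elem_from_any_key :=
  fun dictionary possible_keys _ _ => dict_foldl_eq_filterMap_head dictionary possible_keys
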